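-- pv_equiv track=rewrite | github.com/msalek1/Kleinanzeigen.de-Laptop-Scraper-with-React-Dashboard- | backend/scraper.py | _looks_like_blocked_page
-- ===== SOURCE A (Python) =====
-- def _looks_like_blocked_page(html: str) -> bool:
--     """
--     Heuristic detection for access blocks / challenge pages.
--
--     This does not attempt to bypass access controls; it just helps fail fast
--     and apply backoff when the site presents a block page.
--     """
--     lower = html.lower()
--     markers = (
--         'captcha',
--         'robot',
--         'zugriff verweigert',
--         'access denied',
--         'unusual traffic',
--         'bot detection',
--     )
--     return any(m in lower for m in markers)
-- ===== SOURCE B (Python) =====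
-- def _looks_like_blocked_page(html: str) -> bool:
--     """
--     Heuristic detection for access blocks / challenge pages.
--
--     Streaming multi-pattern matcher: one left-to-right pass over the lowered
--     page keeping an accumulator of in-progress partial matches (the unread
--     remainders of markers whose prefix matched a suffix of the text read so
--     far); no position is ever re-scanned by restarting a substring search.
--     """
--     markers = (
--         'captcha',
--         'robot',
--         'zugriff verweigert',
--         'access denied',
--         'unusual traffic',
--         'bot detection',
--     )
--     active = []  # remainders of markers currently partially matched
--     for c in html.lower():
--         nxt = []
--         for cand in active + list(markers):
--             if cand[0] == c:
--                 rest = cand[1:]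
--                 if not rest:
--                     return True
--                 nxt.append(rest)
--         active = nxt
--     return False
-- ===== Notes on version B (the rewrite author's own statement) =====
-- stated objective: alternative
-- what changed: Replaces six independent whole-string substring searches with a single streaming left-to-right pass that maintains an accumulator of in-progress partial matches (marker remainders), advancing or dropping each on every character and reporting a block as soon as any marker completes.
import Mathlib
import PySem

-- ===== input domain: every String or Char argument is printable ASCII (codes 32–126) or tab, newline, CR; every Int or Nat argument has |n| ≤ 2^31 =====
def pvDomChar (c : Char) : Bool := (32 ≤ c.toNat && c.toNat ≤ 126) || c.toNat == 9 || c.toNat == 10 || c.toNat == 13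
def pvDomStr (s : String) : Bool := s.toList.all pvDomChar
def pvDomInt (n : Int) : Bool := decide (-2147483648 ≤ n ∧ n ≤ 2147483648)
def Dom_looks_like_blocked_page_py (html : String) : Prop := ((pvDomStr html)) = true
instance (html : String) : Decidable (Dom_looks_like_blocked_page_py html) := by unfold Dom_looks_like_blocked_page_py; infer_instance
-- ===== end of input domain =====

-- B replaces A's six independent whole-string substring searches by ONE streaming
-- left-to-right pass keeping an accumulator of in-progress partial matches
-- (marker remainders); objective: alternative (a different algorithm, same cost).

-- the shared marker tuple, as lists of chars
def pvMarkers : List (List Char) :=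
  [ "captcha".toList, "robot".toList, "zugriff verweigert".toList,
    "access denied".toList, "unusual traffic".toList, "bot detection".toList ]

-- ===== PORT A =====
-- A: lower = html.lower(); return any(m in lower for m in markers)
def looks_like_blocked_page_py (html : String) : Bool :=
  let lower := PySem.Chars.lower html.toList
  pvMarkers.any (fun m => PySem.Chars.isIn m lower)

-- ===== PORT B =====
-- the inner 'for cand in active + list(markers)' loop: advance each candidate on
-- character c; 'none' = a marker completed ('return True'), 'some nxt' = the new
-- accumulator.  (The '[]' candidate case is unreachable: the accumulator only
-- ever holds nonempty remainders; Python would raise on cand[0] there.)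
def pvAdvance (c : Char) : List (List Char) → Option (List (List Char))
  | [] => some []
  | [] :: cands => pvAdvance c cands          -- unreachable in the algorithm
  | (x :: xs) :: cands =>
      if x = c then
        if xs = [] then none                 -- marker completed: return True
        else (pvAdvance c cands).map (xs :: ·)
      else pvAdvance c cands

-- the outer 'for c in html.lower()' loop with accumulator 'active'
def pvScan : List Char → List (List Char) → Bool
  | [], _ => false
  | c :: rest, active =>
      match pvAdvance c (active ++ pvMarkers) with
      | none => true
      | some nxt => pvScan rest nxt

def looks_like_blocked_page_py_alt (html : String) : Bool :=
  pvScan (PySem.Chars.lower html.toList) []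

-- ===== PRECONDITION & SPEC =====
def Spec_looks_like_blocked_page_py (html : String) (out : Bool) : Prop := out = looks_like_blocked_page_py_alt html
instance (html : String) (out : Bool) : Decidable (Spec_looks_like_blocked_page_py html out) := by unfold Spec_looks_like_blocked_page_py; infer_instance

-- ===== CLAIM (what is proved, stated in full; the proofs are below) =====
def Claim_equal_looks_like_blocked_page_py : Prop := ∀ (html : String), Dom_looks_like_blocked_page_py html → Spec_looks_like_blocked_page_py html (looks_like_blocked_page_py html)

-- ===== LEMMAS AND PROOFS =====

theorem pvMarkers_ne_nil : ∀ m ∈ pvMarkers, m ≠ [] := by decide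

-- equation lemmas for pvAdvance (its if-then-else split into cases)
theorem pvAdvance_nil (c : Char) : pvAdvance c [] = some [] := rfl

theorem pvAdvance_cons_empty (c : Char) (L : List (List Char)) :
    pvAdvance c ([] :: L) = pvAdvance c L := rfl

theorem pvAdvance_cons_done (c : Char) (L : List (List Char)) :
    pvAdvance c ([c] :: L) = none := by
  simp [pvAdvance]

theorem pvAdvance_cons_adv (c y : Char) (ys : List Char) (L : List (List Char)) :
    pvAdvance c ((c :: y :: ys) :: L) = (pvAdvance c L).map ((y :: ys) :: ·) := by
  simp [pvAdvance]

theorem pvAdvance_cons_skip (c x : Char) (xs : List Char) (L : List (List Char))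
    (h : x ≠ c) : pvAdvance c ((x :: xs) :: L) = pvAdvance c L := by
  simp [pvAdvance, h]

-- pvAdvance returns none exactly when some candidate is the one-character list [c]
theorem pvAdvance_eq_none (c : Char) (L : List (List Char)) :
    pvAdvance c L = none ↔ [c] ∈ L := by
  induction L with
  | nil => simp [pvAdvance_nil]
  | cons hd tl ih =>
    cases hd with
    | nil => simp [pvAdvance_cons_empty, ih]
    | cons x xs =>
      by_cases hx : x = c
      · subst hx
        cases xs with
        | nil => simp [pvAdvance_cons_done]
        | cons y ys =>
          rw [pvAdvance_cons_adv]
          simp only [Option.map_eq_none_iff, ih, List.mem_cons]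
          constructor
          · exact Or.inr
          · rintro (h | h)
            · cases h
            · exact h
      · rw [pvAdvance_cons_skip c x xs tl hx, ih]
        simp only [List.mem_cons]
        constructor
        · exact Or.inr
        · rintro (h | h)
          · injection h with h1 _; exact absurd h1.symm hx
          · exact h

-- when no candidate completes, pvAdvance keeps exactly the advanced remainders
theorem pvAdvance_eq_some (c : Char) (L N : List (List Char))
    (h : pvAdvance c L = some N) :
    ∀ r, r ∈ N ↔ (c :: r) ∈ L ∧ r ≠ [] := by
  induction L generalizing N with
  | nil => rw [pvAdvance_nil] at h; injection h with h; subst h; simp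
  | cons hd tl ih =>
    cases hd with
    | nil =>
      intro r
      rw [ih N (by rwa [pvAdvance_cons_empty] at h) r]
      simp
    | cons x xs =>
      by_cases hx : x = c
      · subst hx
        cases xs with
        | nil => rw [pvAdvance_cons_done] at h; cases h
        | cons y ys =>
          rw [pvAdvance_cons_adv, Option.map_eq_some_iff] at h
          obtain ⟨N', hN', rfl⟩ := h
          intro r
          simp only [List.mem_cons, ih N' hN' r]
          constructor
          · rintro (rfl | ⟨h1, h2⟩)
            · exact ⟨Or.inl rfl, by simp⟩
            · exact ⟨Or.inr h1, h2⟩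
          · rintro ⟨(h1 | h1), h2⟩
            · exact Or.inl (by simpa using h1)
            · exact Or.inr ⟨h1, h2⟩
      · intro r
        rw [ih N (by rwa [pvAdvance_cons_skip c x xs tl hx] at h) r]
        simp only [List.mem_cons]
        constructor
        · rintro ⟨h1, h2⟩; exact ⟨Or.inr h1, h2⟩
        · rintro ⟨(h1 | h1), h2⟩
          · injection h1 with e _; exact absurd e.symm hx
          · exact ⟨h1, h2⟩

-- loop invariant: the streaming scan succeeds iff some active remainder is a
-- (nonempty) prefix of the remaining text, or some marker occurs in it
theorem pvScan_iff (t : List Char) (A : List (List Char)) :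
    pvScan t A = true ↔
      (∃ r ∈ A, r ≠ [] ∧ r <+: t) ∨ (∃ m ∈ pvMarkers, m <:+: t) := by
  induction t generalizing A with
  | nil =>
    simp only [pvScan, Bool.false_eq_true, false_iff]
    rintro (⟨r, _, hne, hp⟩ | ⟨m, hm, hi⟩)
    · exact hne (List.prefix_nil.mp hp)
    · exact pvMarkers_ne_nil m hm (List.infix_nil.mp hi)
  | cons c t ih =>
    simp only [pvScan]
    rcases hadv : pvAdvance c (A ++ pvMarkers) with _ | N
    · -- a marker completed on c: some candidate equals [c]
      rw [pvAdvance_eq_none] at hadv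
      simp only [List.mem_append] at hadv
      simp only [true_iff]
      rcases hadv with h | h
      · exact Or.inl ⟨[c], h, by simp, ⟨t, rfl⟩⟩
      · exact Or.inr ⟨[c], h, List.IsPrefix.isInfix ⟨t, rfl⟩⟩
    · have hmem := pvAdvance_eq_some c (A ++ pvMarkers) N hadv
      have hnc : [c] ∉ A ++ pvMarkers := by
        intro hc
        rw [← pvAdvance_eq_none c (A ++ pvMarkers)] at hc
        rw [hadv] at hc; cases hc
      rw [ih N]
      constructor
      · rintro (⟨r, hr, hne, hp⟩ | ⟨m, hm, hi⟩)
        · rcases (hmem r).mp hr with ⟨hcr, _⟩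
          rcases List.mem_append.mp hcr with h | h
          · exact Or.inl ⟨c :: r, h, by simp, (List.prefix_cons_inj c).mpr hp⟩
          · exact Or.inr ⟨c :: r, h,
              List.IsPrefix.isInfix ((List.prefix_cons_inj c).mpr hp)⟩
        · exact Or.inr ⟨m, hm, hi.trans (List.suffix_cons c t).isInfix⟩
      · rintro (⟨r, hr, hne, hp⟩ | ⟨m, hm, hi⟩)
        · -- an old active remainder r is a prefix of c :: t
          cases r with
          | nil => exact absurd rfl hne
          | cons x xs =>
            obtain ⟨u, hu⟩ := hp
            injection hu with hx hu
            subst hx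
            have hxs : xs ≠ [] := by
              rintro rfl
              exact hnc (List.mem_append.mpr (Or.inl hr))
            exact Or.inl ⟨xs, (hmem xs).mpr
              ⟨List.mem_append.mpr (Or.inl hr), hxs⟩, hxs, ⟨u, hu⟩⟩
        · -- a marker infix of c :: t: either it starts at c, or it is infix of t
          obtain ⟨s₁, s₂, hs⟩ := hi
          cases s₁ with
          | cons y ys =>
            have : m <:+: t := by
              injection hs with _ hs
              exact ⟨ys, s₂, hs⟩
            exact Or.inr ⟨m, hm, this⟩
          | nil =>
            cases m with
            | nil => exact absurd rfl (pvMarkers_ne_nil _ hm)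
            | cons x xs =>
              injection hs with hx hu
              subst hx
              have hxs : xs ≠ [] := by
                rintro rfl
                exact hnc (List.mem_append.mpr (Or.inr hm))
              exact Or.inl ⟨xs, (hmem xs).mpr
                ⟨List.mem_append.mpr (Or.inr hm), hxs⟩, hxs, ⟨s₂, hu⟩⟩

-- ===== VERDICT (by name: the statement is the Claim_ definition above) =====
theorem looks_like_blocked_page_py_spec : Claim_equal_looks_like_blocked_page_py := by
  intro html _
  unfold Spec_looks_like_blocked_page_py looks_like_blocked_page_py looks_like_blocked_page_py_alt
  rw [Bool.eq_iff_iff, pvScan_iff]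
  simp only [List.any_eq_true, PySem.Chars.isIn_iff_infix, List.not_mem_nil,
    false_and, exists_false, ne_eq, false_or]
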